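-- pv_equiv track=rewrite | github.com/hczhu/IBM-Ponder-This-solvers | 2025-11.py | find_first_char
-- ===== SOURCE A (Python) =====
-- from typing import Tuple, Self, List, Dict
--
-- def find_first_char(trans_map: Dict[str, str], s0: str, n: int) -> str:
--     steps = 0
--     ch = s0[0]
--     seen = {ch: 0}
--     assert len(ch) == 1
--     while n > 0:
--         steps += 1
--         n -= 1
--         ch = trans_map[ch][0]
--         if ch in seen:
--             n %= (steps - seen[ch])
--         else:
--             seen[ch] = steps
--     return ch
-- ===== SOURCE B (Python) =====
-- def find_first_char(trans_map, s0, n):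
--     ch = s0[0]
--     assert len(ch) == 1
--     path = [ch]          # path[i] is the char after i transitions
--     first = {ch: 0}      # first-occurrence index of each visited char
--     steps = 0
--     while steps < n:
--         steps += 1
--         ch = trans_map[ch][0]
--         if ch in first:
--             # entered a cycle: jump to the answer in closed form
--             s = first[ch]
--             cycle_len = steps - s
--             return path[s + (n - steps) % cycle_len]
--         first[ch] = steps
--         path.append(ch)
--     return ch
-- ===== Notes on version B (the rewrite author's own statement) =====
-- stated objective: alternative
-- what changed: A reduces the remaining count modulo the cycle length and keeps stepping through the cycle; B records the trajectory in a list with first-occurrence indices and, at the first repeated character, returns the answer by one closed-form indexed jump into the stored path, never walking past the repeat.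
import Mathlib
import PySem

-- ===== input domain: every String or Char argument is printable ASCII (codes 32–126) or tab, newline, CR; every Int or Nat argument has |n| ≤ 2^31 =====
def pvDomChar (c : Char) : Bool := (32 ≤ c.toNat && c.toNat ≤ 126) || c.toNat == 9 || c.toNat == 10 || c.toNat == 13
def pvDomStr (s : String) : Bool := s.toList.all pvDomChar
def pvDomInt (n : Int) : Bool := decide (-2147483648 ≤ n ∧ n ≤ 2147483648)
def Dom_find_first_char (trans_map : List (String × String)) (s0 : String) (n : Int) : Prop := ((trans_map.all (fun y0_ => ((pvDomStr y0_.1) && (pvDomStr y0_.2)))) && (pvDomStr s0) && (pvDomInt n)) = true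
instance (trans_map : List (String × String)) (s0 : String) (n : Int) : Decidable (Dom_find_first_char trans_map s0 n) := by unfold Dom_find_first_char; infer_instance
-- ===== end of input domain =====

-- B replaces A's "reduce n modulo the cycle length and keep walking" by recording the
-- trajectory and, at the first repeated character, returning the answer by a direct
-- indexed jump into the stored path (objective: alternative decomposition, not speed).

-- ===== PORT A =====

-- shared helper: trans_map[ch][0]  (dict lookup = first match in the association list;
-- "" stands for the KeyError / IndexError cases, which Pre_ excludes)
def pvNext (tm : List (String × String)) (ch : String) : String :=
  match tm.find? (fun p => p.1 == ch) with
  | some p =>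
    match PySem.Str.pyGet? p.2 0 with
    | some c => String.ofList [c]
    | none => ""          -- trans_map[ch] = "": IndexError, excluded by Pre_
  | none => ""            -- ch not a key: KeyError, excluded by Pre_

-- termination helper for pvLoopA: one loop iteration strictly decreases n
lemma pvModShrink (n b : Int) (hn : 0 < n) : (PySem.Int.mod (n - 1) b).toNat < n.toNat := by
  rcases lt_trichotomy b 0 with hb | hb | hb
  · have h1 := (PySem.Int.mod_neg_bounds (a := n - 1) hb).2
    omega
  · subst hb
    have h : PySem.Int.mod (n - 1) 0 = n - 1 := Int.fmod_zero (n - 1)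
    omega
  · rw [PySem.Int.mod_eq_emod_of_pos hb]
    have h1 : 0 ≤ (n - 1) % b := Int.emod_nonneg _ (by omega)
    have hd : 0 ≤ (n - 1) / b := Int.ediv_nonneg (by omega) (by omega)
    have hm : (n - 1) % b = (n - 1) - b * ((n - 1) / b) := Int.emod_def (n - 1) b
    have h2 : 0 ≤ b * ((n - 1) / b) := mul_nonneg (by omega) hd
    omega

-- the while-loop of A, state (n, steps, ch, seen)
def pvLoopA (tm : List (String × String)) (n steps : Int) (ch : String)
    (seen : PySem.Dict String Int) : String :=
  if 0 < n then
    match seen.get? (pvNext tm ch) with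
    | some j =>
      pvLoopA tm (PySem.Int.mod (n - 1) (steps + 1 - j)) (steps + 1) (pvNext tm ch) seen
    | none =>
      pvLoopA tm (n - 1) (steps + 1) (pvNext tm ch) (seen.insert (pvNext tm ch) (steps + 1))
  else ch
termination_by n.toNat
decreasing_by
  · exact pvModShrink n (steps + 1 - j) (by omega)
  · omega

def find_first_char (trans_map : List (String × String)) (s0 : String) (n : Int) : String :=
  -- ch = s0[0] (IndexError on empty s0, excluded by Pre_); assert len(ch)==1 always holds
  match PySem.Str.pyGet? s0 0 with
  | none => ""
  | some c => pvLoopA trans_map n 0 (String.ofList [c]) (PySem.Dict.empty.insert (String.ofList [c]) 0)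

-- ===== PORT B =====

-- the while-loop of B, state (steps, ch, path, first); on the first repeat it returns
-- path[s + (n - steps) % cycle_len] directly (index always in range there)
def pvLoopB (tm : List (String × String)) (n steps : Int) (ch : String)
    (path : List String) (first : PySem.Dict String Int) : String :=
  if steps < n then
    match first.get? (pvNext tm ch) with
    | some s =>
      PySem.List.pyGetD path (s + PySem.Int.mod (n - (steps + 1)) (steps + 1 - s)) ""
    | none =>
      pvLoopB tm n (steps + 1) (pvNext tm ch) (path ++ [pvNext tm ch])
        (first.insert (pvNext tm ch) (steps + 1))
  else ch
termination_by (n - steps).toNat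
decreasing_by omega

def find_first_char_alt (trans_map : List (String × String)) (s0 : String) (n : Int) : String :=
  match PySem.Str.pyGet? s0 0 with
  | none => ""
  | some c =>
    pvLoopB trans_map n 0 (String.ofList [c]) [String.ofList [c]]
      (PySem.Dict.empty.insert (String.ofList [c]) 0)

-- ===== PRECONDITION & SPEC =====

-- does ch have a usable transition (a key whose value is non-empty)?
def pvKeyOk (tm : List (String × String)) (ch : String) : Bool :=
  match tm.find? (fun p => p.1 == ch) with
  | some p => !(p.2 == "")
  | none => false

-- first character of s0 as a 1-character string ("" when s0 is empty)
def pvHead1 (s0 : String) : String :=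
  match PySem.Str.pyGet? s0 0 with
  | some c => String.ofList [c]
  | none => ""

-- Pre_ excludes exactly the inputs where A raises: s0 = "" (IndexError), and walks whose
-- first min(n, len(trans_map)+1) characters include one with no non-empty transition
-- (KeyError / IndexError); beyond that many steps the walk provably repeats only
-- already-checked characters, so this bounded condition is exact, not a narrowing.
def Pre_find_first_char (trans_map : List (String × String)) (s0 : String) (n : Int) : Prop :=
  s0 ≠ "" ∧ ∀ k : Nat, k < (min n ((trans_map.length : Int) + 1)).toNat →
    pvKeyOk trans_map ((pvNext trans_map)^[k] (pvHead1 s0)) = true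

instance (trans_map : List (String × String)) (s0 : String) (n : Int) :
    Decidable (Pre_find_first_char trans_map s0 n) := by
  unfold Pre_find_first_char; infer_instance

def pvWitness_find_first_char : (List (String × String)) × String × Int :=
  ([("a", "ba"), ("b", "c"), ("c", "a")], "ab", 100)

def Spec_find_first_char (trans_map : List (String × String)) (s0 : String) (n : Int) (out : String) : Prop := out = find_first_char_alt trans_map s0 n
instance (trans_map : List (String × String)) (s0 : String) (n : Int) (out : String) : Decidable (Spec_find_first_char trans_map s0 n out) := by unfold Spec_find_first_char; infer_instance

-- ===== CLAIM (what is proved, stated in full; the proofs are below) =====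
def Claim_equal_find_first_char : Prop := ∀ (trans_map : List (String × String)) (s0 : String) (n : Int), Dom_find_first_char trans_map s0 n → Pre_find_first_char trans_map s0 n → Spec_find_first_char trans_map s0 n (find_first_char trans_map s0 n)

-- ===== LEMMAS AND PROOFS =====

-- periodicity of iteration: once f^[s+L] x = f^[s] x, indices past s may be reduced mod L
lemma pvIterPeriod {α : Type} (f : α → α) (x : α) (s L : ℕ) (hL : 0 < L)
    (h : f^[s + L] x = f^[s] x) : ∀ k : ℕ, f^[s + k] x = f^[s + k % L] x := by
  intro k
  induction k using Nat.strong_induction_on with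
  | _ k ih =>
    by_cases hk : k < L
    · rw [Nat.mod_eq_of_lt hk]
    · have hmod : k % L = (k - L) % L := Nat.mod_eq_sub_mod (le_of_not_gt hk)
      have h1 : f^[s + k] x = f^[s + (k - L)] x := by
        have e : s + k = (k - L) + (s + L) := by omega
        rw [e, Function.iterate_add_apply, h, ← Function.iterate_add_apply]
        have e2 : k - L + s = s + (k - L) := by omega
        rw [e2]
      rw [h1, ih (k - L) (by omega), hmod]

lemma pvJump {α : Type} (f : α → α) (x : α) (s L : ℕ) (hL : 0 < L)
    (h : f^[s + L] x = f^[s] x) (k : ℕ) : f^[s + L + k] x = f^[s + k % L] x := by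
  have h1 := pvIterPeriod f x s L hL h (L + k)
  rw [Nat.add_mod_left] at h1
  have e : s + L + k = s + (L + k) := by omega
  rw [e, h1]

-- value of PySem.Int.mod as a Nat mod, for nonnegative dividend and positive divisor
lemma pvModCast (a b : Int) (ha : 0 ≤ a) (hb : 0 < b) :
    PySem.Int.mod a b = ((a.toNat % b.toNat : ℕ) : ℤ) := by
  rw [PySem.Int.mod_eq_emod_of_pos hb]
  rw [Int.natCast_mod]
  rw [Int.toNat_of_nonneg ha, Int.toNat_of_nonneg (le_of_lt hb)]

-- loop A computes the pure iterate: result = f^[steps + max n 0] x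
lemma pvLoopA_eq (x : String) (tm : List (String × String)) (n steps : Int) (ch : String)
    (seen : PySem.Dict String Int) :
    0 ≤ steps →
    ch = (pvNext tm)^[steps.toNat] x →
    (∀ c j, seen.get? c = some j → 0 ≤ j ∧ j ≤ steps ∧ c = (pvNext tm)^[j.toNat] x) →
    pvLoopA tm n steps ch seen = (pvNext tm)^[(steps + max n 0).toNat] x := by
  induction n, steps, ch, seen using pvLoopA.induct (tm := tm) with
  | case1 n steps ch seen hn j hj ih =>
    intro hst hch hseen
    obtain ⟨hj0, hjle, hjc⟩ := hseen _ _ hj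
    have hch' : pvNext tm ch = (pvNext tm)^[steps.toNat + 1] x := by
      rw [Function.iterate_succ_apply', ← hch]
    rw [pvLoopA]
    simp only [if_pos hn, hj]
    rw [ih (by omega) (by rw [hch']; rw [show (steps + 1).toNat = steps.toNat + 1 by omega])
        (fun c j' hj' => by
          obtain ⟨h1, h2, h3⟩ := hseen c j' hj'
          exact ⟨h1, by omega, h3⟩)]
    rw [pvModCast (n - 1) (steps + 1 - j) (by omega) (by omega)]
    have hL : 0 < (steps + 1 - j).toNat := by omega
    have hper : (pvNext tm)^[j.toNat + (steps + 1 - j).toNat] x = (pvNext tm)^[j.toNat] x := by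
      rw [show j.toNat + (steps + 1 - j).toNat = steps.toNat + 1 by omega]
      exact hch'.symm.trans hjc
    have hkk : ((n - 1).toNat % (steps + 1 - j).toNat) % (steps + 1 - j).toNat
        = (n - 1).toNat % (steps + 1 - j).toNat := Nat.mod_eq_of_lt (Nat.mod_lt _ hL)
    have e1 : (steps + 1 + max (((((n - 1).toNat % (steps + 1 - j).toNat) : ℕ)) : ℤ) 0).toNat
        = j.toNat + (steps + 1 - j).toNat + (n - 1).toNat % (steps + 1 - j).toNat := by omega
    have e2 : (steps + max n 0).toNat
        = j.toNat + (steps + 1 - j).toNat + (n - 1).toNat := by omega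
    rw [e1, e2, pvJump _ _ _ _ hL hper, pvJump _ _ _ _ hL hper, hkk]
  | case2 n steps ch seen hn hj ih =>
    intro hst hch hseen
    have hch' : pvNext tm ch = (pvNext tm)^[steps.toNat + 1] x := by
      rw [Function.iterate_succ_apply', ← hch]
    rw [pvLoopA]
    simp only [if_pos hn, hj]
    rw [ih (by omega) (by rw [hch']; rw [show (steps + 1).toNat = steps.toNat + 1 by omega])
        (fun c j' hj' => by
          by_cases hc : c = pvNext tm ch
          · subst hc
            rw [PySem.Dict.get?_insert_self] at hj'
            obtain rfl : j' = steps + 1 := by simpa using hj'.symm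
            exact ⟨by omega, le_rfl, by
              rw [hch', show (steps + 1).toNat = steps.toNat + 1 by omega]⟩
          · rw [PySem.Dict.get?_insert_of_ne _ _ hc] at hj'
            obtain ⟨h1, h2, h3⟩ := hseen c j' hj'
            exact ⟨h1, by omega, h3⟩)]
    rw [show (steps + 1 + max (n - 1) 0).toNat = (steps + max n 0).toNat by omega]
  | case3 n steps ch seen hn =>
    intro hst hch hseen
    rw [pvLoopA]
    simp only [if_neg hn]
    rw [hch, show steps.toNat = (steps + max n 0).toNat by omega]

-- loop B computes the pure iterate: result = f^[max steps n] x
lemma pvLoopB_eq (x : String) (tm : List (String × String)) (n steps : Int) (ch : String)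
    (path : List String) (first : PySem.Dict String Int) :
    0 ≤ steps →
    ch = (pvNext tm)^[steps.toNat] x →
    path = (List.range (steps.toNat + 1)).map (fun i => (pvNext tm)^[i] x) →
    (∀ c j, first.get? c = some j → 0 ≤ j ∧ j ≤ steps ∧ c = (pvNext tm)^[j.toNat] x) →
    pvLoopB tm n steps ch path first = (pvNext tm)^[(max steps n).toNat] x := by
  induction steps, ch, path, first using pvLoopB.induct (tm := tm) (n := n) with
  | case1 steps ch path first hn s hs =>
    intro hst hch hpath hfirst
    obtain ⟨hs0, hsle, hsc⟩ := hfirst _ _ hs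
    have hch' : pvNext tm ch = (pvNext tm)^[steps.toNat + 1] x := by
      rw [Function.iterate_succ_apply', ← hch]
    rw [pvLoopB]
    simp only [if_pos hn, hs]
    rw [pvModCast (n - (steps + 1)) (steps + 1 - s) (by omega) (by omega)]
    have hL : 0 < (steps + 1 - s).toNat := by omega
    have hper : (pvNext tm)^[s.toNat + (steps + 1 - s).toNat] x = (pvNext tm)^[s.toNat] x := by
      rw [show s.toNat + (steps + 1 - s).toNat = steps.toNat + 1 by omega]
      exact hch'.symm.trans hsc
    subst hpath
    have hm : (n - (steps + 1)).toNat % (steps + 1 - s).toNat < (steps + 1 - s).toNat :=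
      Nat.mod_lt _ hL
    rw [PySem.List.pyGetD_eq_getElem _ _ (by omega)
      (by simp only [List.length_map, List.length_range]; push_cast; omega)]
    simp only [List.getElem_map, List.getElem_range]
    rw [show (s + ((((n - (steps + 1)).toNat % (steps + 1 - s).toNat : ℕ)) : ℤ)).toNat
        = s.toNat + (n - (steps + 1)).toNat % (steps + 1 - s).toNat by omega]
    rw [show (max steps n).toNat
        = s.toNat + (steps + 1 - s).toNat + (n - (steps + 1)).toNat by omega]
    rw [pvJump _ _ _ _ hL hper]
  | case2 steps ch path first hn hs ih =>
    intro hst hch hpath hfirst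
    have hch' : pvNext tm ch = (pvNext tm)^[steps.toNat + 1] x := by
      rw [Function.iterate_succ_apply', ← hch]
    rw [pvLoopB]
    simp only [if_pos hn, hs]
    rw [ih (by omega) (by rw [hch']; rw [show (steps + 1).toNat = steps.toNat + 1 by omega])
        (by
          rw [hpath, hch']
          simp [List.range_succ, show (steps + 1).toNat = steps.toNat + 1 by omega])
        (fun c j' hj' => by
          by_cases hc : c = pvNext tm ch
          · subst hc
            rw [PySem.Dict.get?_insert_self] at hj'
            obtain rfl : j' = steps + 1 := by simpa using hj'.symm
            exact ⟨by omega, le_rfl, by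
              rw [hch', show (steps + 1).toNat = steps.toNat + 1 by omega]⟩
          · rw [PySem.Dict.get?_insert_of_ne _ _ hc] at hj'
            obtain ⟨h1, h2, h3⟩ := hfirst c j' hj'
            exact ⟨h1, by omega, h3⟩)]
    rw [show (max (steps + 1) n).toNat = (max steps n).toNat by omega]
  | case3 steps ch path first hn =>
    intro hst hch hpath hfirst
    rw [pvLoopB]
    simp only [if_neg hn]
    rw [hch, show steps.toNat = (max steps n).toNat by omega]

-- ===== VERDICT (by name: the statement is the Claim_ definition above) =====
theorem find_first_char_spec : Claim_equal_find_first_char := by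
  intro tm s0 n _ _
  unfold Spec_find_first_char find_first_char find_first_char_alt
  cases PySem.Str.pyGet? s0 0 with
  | none => simp only []
  | some c =>
    simp only []
    have hinv : ∀ c' j, ((PySem.Dict.empty (κ := String) (ν := Int)).insert (String.ofList [c]) 0).get? c' = some j →
        0 ≤ j ∧ j ≤ (0 : ℤ) ∧ c' = (pvNext tm)^[j.toNat] (String.ofList [c]) := by
      intro c' j hj
      by_cases hc : c' = String.ofList [c]
      · subst hc
        rw [PySem.Dict.get?_insert_self] at hj
        obtain rfl : j = 0 := by simpa using hj.symm
        exact ⟨le_rfl, le_rfl, by simp⟩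
      · rw [PySem.Dict.get?_insert_of_ne _ _ hc] at hj
        simp [PySem.Dict.empty, PySem.Dict.get?] at hj
    rw [pvLoopA_eq (String.ofList [c]) tm n 0 _ _ le_rfl (by simp) hinv,
        pvLoopB_eq (String.ofList [c]) tm n 0 _ _ _ le_rfl (by simp) (by simp) hinv]
    have e : (0 + max n 0).toNat = (max 0 n).toNat := by omega
    rw [e]
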